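-- pv_equiv track=rewrite | github.com/std-modelware/polytech-diskrete-2020 | Kirillova Arina/lab002.py | RemoveEqual
-- ===== SOURCE A (Python) =====
-- def RemoveEqual(comb: list):
--     comb2 = []
--     for i in range(len(comb)):
--         if comb[i] != None:
--             comb2.append(comb[i])
--             for j in range(i + 1, len(comb)):
--                 if (comb[j] != None and Compare(comb[i], comb[j])):
--                     comb[j] = None
--     return comb2
--
-- def CycleStep(arr : list, step : int):
--     arr2 = []
--     for i in range(len(arr)):
--         arr2.append(arr[(i + step) % len(arr)])
--     return arr2
--
-- def Compare(arr1: list, arr2: list):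
--     for shift in range(len(arr1)):
--         flag = True
--         for j in range(len(arr1)):
--             if (arr1[j] != arr2[j]):
--                 flag = False
--                 break
--         if flag:
--             return True
--         arr1 = CycleStep(arr1, 1)
--     return False
-- ===== SOURCE B (Python) =====
-- def _canon(row):
--     # lexicographically smallest cyclic rotation, as a hashable tuple
--     if not row:
--         return ()
--     return min(tuple(row[s:] + row[:s]) for s in range(len(row)))
--
-- def RemoveEqual(comb: list):
--     out = []
--     seen = set()
--     for row in comb:
--         key = _canon(row)
--         if key not in seen:
--             seen.add(key)
--             out.append(row)
--     return out
-- ===== Notes on version B (the rewrite author's own statement) =====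
-- stated objective: faster
-- what changed: A repeatedly re-rotates each kept row and compares it elementwise against every later row (marking matches None in place); B makes one pass keeping a hash set of the canonical (lexicographically minimal) rotation of each kept row, so each row costs one canonical-form computation and one set lookup instead of a rotation scan against every kept row; …
-- intended difference: On lists with two empty rows, or with a nonempty row followed by a strictly longer row that one of its rotations is a prefix of, A's Compare (which checks only len(arr1) positions, and no positions at all for empty rows) wrongly drops the longer row and keeps duplicate empty rows, while B deduplicates exactly by cyclic-rotation equality, which is the intended behaviour. — e.g. on RemoveEqual([[], []]): A returns [[], []], B returns [[]]
-- outside the precondition, e.g. on RemoveEqual([[1], [1, 2], [2]]): A returns [[1], [2]], B returns [[1], [1, 2], [2]]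
import Mathlib
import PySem

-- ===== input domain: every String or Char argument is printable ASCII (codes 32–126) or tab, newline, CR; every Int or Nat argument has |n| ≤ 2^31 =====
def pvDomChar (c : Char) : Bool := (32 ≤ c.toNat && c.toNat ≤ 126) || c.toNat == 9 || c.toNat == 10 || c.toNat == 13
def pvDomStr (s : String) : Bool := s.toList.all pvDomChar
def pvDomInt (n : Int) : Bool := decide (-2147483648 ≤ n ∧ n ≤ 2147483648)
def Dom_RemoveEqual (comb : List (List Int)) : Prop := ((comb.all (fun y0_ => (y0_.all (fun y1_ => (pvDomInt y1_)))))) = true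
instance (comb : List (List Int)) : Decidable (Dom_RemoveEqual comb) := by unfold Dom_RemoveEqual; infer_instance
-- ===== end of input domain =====

-- B replaces A's quadratic pairwise rotation comparisons by one pass over the rows keeping a hash
-- set of the canonical (lexicographically minimal) rotation of each kept row (objective: faster).
-- Note: Python A mutates its argument (overwrites matched entries with None); B does not — the
-- equivalence proved here is about the return value only.

-- ===== PORT A =====
-- CycleStep(arr, step): arr2[i] = arr[(i+step) % len(arr)].  The index (i+step) % len(arr) is
-- always in range (0 ≤ i < len, Python mod of the positive length), so the default 0 is never read.
def CycleStepA (arr : List Int) (step : Int) : List Int :=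
  (PySem.List.pyRange 0 (PySem.List.len arr) 1).map
    (fun i => PySem.List.pyGetD arr (PySem.Int.mod (i + step) (PySem.List.len arr)) 0)

-- the j-loop of Compare (flag stays True while arr1[j] == arr2[j]).  Where Python would raise
-- IndexError on arr2[j] (only outside Pre_RemoveEqual) the out-of-range lookup is rendered as a
-- mismatch; inside Pre_ a mismatch always occurs before that index, so the port is exact there.
def cmpLoopA (arr1 arr2 : List Int) (j : Nat) : Bool :=
  if _h : j < arr1.length then
    if PySem.List.pyGet? arr1 (j : Int) = PySem.List.pyGet? arr2 (j : Int) then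
      cmpLoopA arr1 arr2 (j + 1)
    else false
  else true
termination_by arr1.length - j

-- the shift-loop of Compare: n remaining shifts, arr1 replaced by CycleStep(arr1, 1) each round
def shiftLoopA (arr1 arr2 : List Int) : Nat → Bool
  | 0 => false
  | n + 1 => if cmpLoopA arr1 arr2 0 then true else shiftLoopA (CycleStepA arr1 1) arr2 n

def CompareA (arr1 arr2 : List Int) : Bool := shiftLoopA arr1 arr2 arr1.length

-- the inner j-loop of RemoveEqual: comb[j] = None for every not-yet-None comb[j] matching comb[i]
def markTailA (x : List Int) (rest : List (Option (List Int))) : List (Option (List Int)) :=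
  rest.map (fun y => match y with
    | none => none
    | some arr => if CompareA x arr then none else some arr)

-- the outer i-loop over the (mutated) comb; None entries are skipped
def outerA : List (Option (List Int)) → List (List Int)
  | [] => []
  | none :: t => outerA t
  | some x :: t => x :: outerA (markTailA x t)
termination_by l => l.length
decreasing_by
  · simp
  · simp [markTailA]

def RemoveEqual (comb : List (List Int)) : List (List Int) := outerA (comb.map some)

-- ===== PORT B =====
-- the rotations row[s:] + row[:s] for s in range(len(row))
def rotsB (row : List Int) : List (List Int) :=
  (PySem.List.pyRange 0 (PySem.List.len row) 1).map
    (fun s => PySem.List.slice row (some s) none ++ PySem.List.slice row none (some s))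

-- _canon(row): () for the empty row, else min over the rotations (Python's min on same-length
-- tuples is the lexicographic minimum = Lean's linear order on List Int; rotsB row is nonempty
-- there, so min? is always some and the .getD default is never read)
def canonB (row : List Int) : List Int :=
  if row = [] then [] else (PySem.List.min? (rotsB row) (fun x : List Int => x)).getD []

-- loop body; state = (out, seen)
def stepB (st : List (List Int) × PySem.Set (List Int)) (row : List Int) :
    List (List Int) × PySem.Set (List Int) :=
  if PySem.Set.contains st.2 (canonB row) then st
  else (st.1 ++ [row], PySem.Set.add st.2 (canonB row))

def RemoveEqual_alt (comb : List (List Int)) : List (List Int) :=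
  (comb.foldl stepB ([], PySem.Set.empty)).1

-- ===== PRECONDITION & SPEC =====
-- Pre_ excludes combs containing an earlier row a and a later strictly shorter row b such that
-- some cyclic rotation of a begins with b: on such pairs A's Compare raises IndexError when they
-- are actually compared.  (On a few such combs the dangerous pair is never reached because its
-- first row was already removed, and A still returns; Pre_ conservatively excludes those too —
-- see the cite in the claim.)
def Pre_RemoveEqual (comb : List (List Int)) : Prop :=
  comb.Pairwise (fun a b =>
    ¬ (b.length < a.length ∧ ∃ s < a.length, (a.rotate s).take b.length = b))
instance (comb : List (List Int)) : Decidable (Pre_RemoveEqual comb) := by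
  unfold Pre_RemoveEqual; infer_instance

def pvWitness_RemoveEqual : List (List Int) := [[1, 2], [2, 1], [3]]

-- a pair of rows (a earlier, b later) on which A's Compare agrees with cyclic-rotation equality
def GoodPairRE (a b : List Int) : Prop :=
  ¬ ((a = [] ∧ b = []) ∨
     (a ≠ [] ∧ a.length < b.length ∧ ∃ s < a.length, a.rotate s = b.take a.length))

-- On lists with two empty rows, or with a nonempty row followed by a strictly longer row that one
-- of its rotations is a prefix of, A's Compare (which checks only len(arr1) positions, and no
-- positions at all for empty rows) wrongly drops the longer row and keeps duplicate empty rows,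
-- while B deduplicates exactly by cyclic-rotation equality, which is the intended behaviour.
def D_RemoveEqual (comb : List (List Int)) : Prop := ¬ comb.Pairwise GoodPairRE
instance (comb : List (List Int)) : Decidable (D_RemoveEqual comb) := by
  unfold D_RemoveEqual GoodPairRE; infer_instance

def Spec_RemoveEqual (comb : List (List Int)) (out : List (List Int)) : Prop :=
  ¬ D_RemoveEqual comb → out = RemoveEqual_alt comb
instance (comb : List (List Int)) (out : List (List Int)) : Decidable (Spec_RemoveEqual comb out) := by unfold Spec_RemoveEqual; infer_instance

def pvDiffWitness_RemoveEqual : List (List Int) := [[], []]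
def pvDiffWitnessOut_RemoveEqual : (List (List Int)) × (List (List Int)) := ([[], []], [[]])

-- ===== CLAIM (what is proved, stated in full; the proofs are below) =====
def Claim_unchanged_RemoveEqual : Prop := ∀ (comb : List (List Int)), Dom_RemoveEqual comb → Pre_RemoveEqual comb → Spec_RemoveEqual comb (RemoveEqual comb)
def Claim_changed_RemoveEqual : Prop := Dom_RemoveEqual (pvDiffWitness_RemoveEqual) ∧ Pre_RemoveEqual (pvDiffWitness_RemoveEqual) ∧ D_RemoveEqual (pvDiffWitness_RemoveEqual) ∧ RemoveEqual (pvDiffWitness_RemoveEqual) = pvDiffWitnessOut_RemoveEqual.1 ∧ RemoveEqual_alt (pvDiffWitness_RemoveEqual) = pvDiffWitnessOut_RemoveEqual.2 ∧ pvDiffWitnessOut_RemoveEqual.1 ≠ pvDiffWitnessOut_RemoveEqual.2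

-- ===== LEMMAS AND PROOFS =====

-- what CompareA decides: some rotation of k equals the first k.length entries of b
def MatchRel (k b : List Int) : Prop :=
  k.length ≤ b.length ∧ ∃ s < k.length, k.rotate s = b.take k.length

-- A's algorithm with the None-marking compacted away: keep the head, filter the tail
def greedyA : List (List Int) → List (List Int)
  | [] => []
  | c :: t => c :: greedyA (t.filter (fun y => !CompareA c y))
termination_by l => l.length
decreasing_by
  simp only [List.length_cons, List.length_unattach]
  exact Nat.lt_succ_of_le ((List.length_filter_le _ _).trans (by simp))

-- B's algorithm with greedy structure: keep the head, filter its cyclic-equivalents from the tail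
def greedyC : List (List Int) → List (List Int)
  | [] => []
  | c :: t => c :: greedyC (t.filter (fun y => !decide (canonB c = canonB y)))
termination_by l => l.length
decreasing_by
  simp only [List.length_cons, List.length_unattach]
  exact Nat.lt_succ_of_le ((List.length_filter_le _ _).trans (by simp))

-- B's fold with the seen-set replaced by the kept list it encodes
def foldG (kept : List (List Int)) : List (List Int) → List (List Int)
  | [] => kept
  | c :: t =>
    if kept.any (fun k => decide (canonB k = canonB c)) then foldG kept t
    else foldG (kept ++ [c]) t

-- what B's seen-set means in terms of the kept rows
def InvB (kept : List (List Int)) (seen : PySem.Set (List Int)) : Prop :=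
  ∀ r, r ∈ seen ↔ ∃ k ∈ kept, r = canonB k

theorem cmpLoopA_iff (a b : List Int) (j : Nat) : cmpLoopA a b j = true ↔
    ∀ i, j ≤ i → i < a.length → a[i]? = b[i]? := by
  induction j using cmpLoopA.induct (arr1 := a) (arr2 := b) with
  | case1 j h heq ih =>
    rw [cmpLoopA, dif_pos h, if_pos heq]
    simp only [PySem.List.pyGet?_natCast] at heq
    rw [ih]
    constructor
    · intro hall i hji hilt
      rcases Nat.eq_or_lt_of_le hji with rfl | hlt
      · exact heq
      · exact hall i hlt hilt
    · intro hall i hji hilt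
      exact hall i (by omega) hilt
  | case2 j h hne =>
    rw [cmpLoopA, dif_pos h, if_neg hne]
    simp only [PySem.List.pyGet?_natCast] at hne
    simp only [Bool.false_eq_true, false_iff]
    intro hall
    exact hne (hall j (le_refl j) h)
  | case3 j h =>
    rw [cmpLoopA, dif_neg h]
    simp only [true_iff]
    intro i hji hilt
    omega

theorem cmpLoopA_zero_iff (a b : List Int) :
    cmpLoopA a b 0 = true ↔ a.length ≤ b.length ∧ a = b.take a.length := by
  rw [cmpLoopA_iff]
  constructor
  · intro h
    have hle : a.length ≤ b.length := by
      by_contra hgt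
      have h2 := h b.length (by omega) (by omega)
      rw [List.getElem?_eq_none (le_refl b.length)] at h2
      exact absurd h2 (by simp [List.getElem?_eq_getElem (show b.length < a.length by omega)])
    refine ⟨hle, ?_⟩
    apply List.ext_getElem (by simp [hle])
    intro i hi1 hi2
    have hh := h i (Nat.zero_le i) hi1
    rw [List.getElem?_eq_getElem hi1, List.getElem?_eq_getElem (show i < b.length by omega)] at hh
    simpa [List.getElem_take] using hh
  · rintro ⟨hle, heq⟩ i _ hi
    rw [List.getElem?_eq_getElem hi, List.getElem?_eq_getElem (show i < b.length by omega)]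
    have h3 : a[i]'hi = (b.take a.length)[i]'(by simp; omega) := by
      congr 1
    simpa [List.getElem_take] using h3

theorem cycleStepA_one (a : List Int) : CycleStepA a 1 = a.rotate 1 := by
  rcases Nat.eq_zero_or_pos a.length with hz | hpos
  · rw [List.eq_nil_of_length_eq_zero hz]; rfl
  · apply List.ext_getElem
    · simp [CycleStepA, PySem.List.pyRange_one]
    · intro i h1 h2
      have hlen : (PySem.List.pyRange 0 (PySem.List.len a) 1).length = a.length := by
        simp [PySem.List.pyRange_one]
      simp only [CycleStepA, List.length_map] at h1
      simp only [CycleStepA, List.getElem_map]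
      have hi : i < a.length := by simpa [hlen] using h1
      have hre : (PySem.List.pyRange 0 (PySem.List.len a) 1)[i]'h1 = (i : Int) := by
        simp [PySem.List.getElem_pyRange_one]
      rw [hre]
      have hmod : PySem.Int.mod ((i : Int) + 1) (PySem.List.len a)
          = (((i + 1) % a.length : Nat) : Int) := by
        have : ((i : Int) + 1) = ((i + 1 : Nat) : Int) := by push_cast; ring
        rw [this, PySem.List.len_eq, PySem.Int.mod_natCast]
      rw [hmod, PySem.List.pyGetD_natCast, List.getElem_rotate]
      have hlt : (i + 1) % a.length < a.length := Nat.mod_lt _ hpos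
      rw [List.getD_eq_getElem _ _ hlt]

theorem shiftLoopA_iff (b : List Int) (n : Nat) : ∀ a : List Int,
    shiftLoopA a b n = true ↔ ∃ s < n, cmpLoopA (a.rotate s) b 0 = true := by
  induction n with
  | zero => intro a; simp [shiftLoopA]
  | succ m ih =>
    intro a
    rw [shiftLoopA]
    by_cases h0 : cmpLoopA a b 0 = true
    · simp only [if_pos h0, true_iff]
      exact ⟨0, Nat.succ_pos m, by simpa [List.rotate_zero] using h0⟩
    · rw [if_neg h0, cycleStepA_one, ih]
      constructor
      · rintro ⟨s, hs, hc⟩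
        exact ⟨s + 1, by omega, by rwa [List.rotate_rotate, Nat.add_comm] at hc⟩
      · rintro ⟨s, hs, hc⟩
        match s with
        | 0 => exact absurd (by simpa using hc) h0
        | s' + 1 =>
          exact ⟨s', by omega, by rwa [List.rotate_rotate, Nat.add_comm 1 s']⟩

theorem compareA_iff (k b : List Int) : CompareA k b = true ↔ MatchRel k b := by
  rw [CompareA, shiftLoopA_iff, MatchRel]
  constructor
  · rintro ⟨s, hs, hc⟩
    rw [cmpLoopA_zero_iff] at hc
    rcases hc with ⟨hle, heq⟩
    rw [List.length_rotate] at hle heq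
    exact ⟨hle, s, hs, heq⟩
  · rintro ⟨hle, s, hs, heq⟩
    refine ⟨s, hs, ?_⟩
    rw [cmpLoopA_zero_iff, List.length_rotate]
    exact ⟨hle, heq⟩

theorem greedyA_cons (c : List Int) (t : List (List Int)) :
    greedyA (c :: t) = c :: greedyA (t.filter (fun y => !CompareA c y)) := by
  rw [greedyA.eq_def]

theorem greedyC_cons (c : List Int) (t : List (List Int)) :
    greedyC (c :: t) = c :: greedyC (t.filter (fun y => !decide (canonB c = canonB y))) := by
  rw [greedyC.eq_def]

theorem markTailA_filterMap (x : List Int) (s : List (Option (List Int))) :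
    (markTailA x s).filterMap id = (s.filterMap id).filter (fun y => !CompareA x y) := by
  induction s with
  | nil => rfl
  | cons y t ih =>
    cases y with
    | none => simpa [markTailA, List.filterMap_cons] using ih
    | some arr =>
      by_cases h : CompareA x arr
      · simpa [markTailA, List.filterMap_cons, h] using ih
      · simpa [markTailA, List.filterMap_cons, h] using ih

theorem outerA_eq_greedyA (s : List (Option (List Int))) :
    outerA s = greedyA (s.filterMap id) := by
  induction s using outerA.induct with
  | case1 => simp [outerA, greedyA]
  | case2 t ih => simpa [outerA, List.filterMap_cons] using ih
  | case3 x t ih =>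
    rw [outerA, ih, markTailA_filterMap]
    simp only [List.filterMap_cons, id_eq, greedyA_cons]

theorem removeEqual_eq_greedyA (comb : List (List Int)) : RemoveEqual comb = greedyA comb := by
  rw [RemoveEqual, outerA_eq_greedyA]
  congr 1
  rw [List.filterMap_map]
  simp

-- ------- B-side lemmas -------

theorem mem_rotsB (c r : List Int) :
    r ∈ rotsB c ↔ ∃ s < c.length, r = c.rotate s := by
  rw [rotsB]
  simp only [List.mem_map, PySem.List.mem_pyRange_one, PySem.List.len_eq]
  constructor
  · rintro ⟨b, hb, hr⟩
    refine ⟨b.toNat, by omega, ?_⟩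
    rw [← hr, PySem.List.slice_from c hb.1, PySem.List.slice_to c hb.1,
      List.rotate_eq_drop_append_take (by omega)]
  · rintro ⟨s, hs, hr⟩
    refine ⟨(s : Int), ⟨by positivity, by exact_mod_cast hs⟩, ?_⟩
    rw [PySem.List.slice_from c (by positivity), PySem.List.slice_to c (by positivity)]
    simp only [Int.toNat_natCast]
    rw [hr]
    exact (List.rotate_eq_drop_append_take (by omega)).symm

theorem mem_rotsB_iff (c : List Int) (hc : c ≠ []) (r : List Int) :
    r ∈ rotsB c ↔ ∃ s, r = c.rotate s := by
  rw [mem_rotsB]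
  constructor
  · rintro ⟨s, _, hr⟩; exact ⟨s, hr⟩
  · rintro ⟨s, hr⟩
    refine ⟨s % c.length, Nat.mod_lt _ (List.length_pos_of_ne_nil hc), ?_⟩
    rw [hr, List.rotate_mod]

theorem rotsB_ne_nil (c : List Int) (hc : c ≠ []) : rotsB c ≠ [] := by
  intro h
  have : c.rotate 0 ∈ rotsB c :=
    (mem_rotsB c _).mpr ⟨0, List.length_pos_of_ne_nil hc, rfl⟩
  rw [h] at this
  exact absurd this (List.not_mem_nil)

-- the LT instance Lean core gives List Int and the one Mathlib's LinearOrder (List Int) gives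
-- are propositionally equal; this lets the order lemmas about min? apply to the port's term
theorem ltExtRE {kappa : Type} {i1 i2 : LT kappa} (h : @LT.lt kappa i1 = @LT.lt kappa i2) :
    i1 = i2 := by
  cases i1
  cases i2
  exact congrArg LT.mk h

theorem listIntLT_eq : (List.instLT : LT (List Int)) = (inferInstance : LinearOrder (List Int)).toLT := by
  apply ltExtRE
  funext a b
  exact propext (List.lt_iff_lex_lt a b)

theorem min?_instEq {alpha kappa : Type} {i1 i2 : LT kappa} (d1 : @DecidableLT kappa i1)
    (d2 : @DecidableLT kappa i2) (h : i1 = i2) (xs : List alpha) (key : alpha → kappa) :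
    @PySem.List.min? alpha kappa i1 d1 xs key = @PySem.List.min? alpha kappa i2 d2 xs key := by
  subst h
  have hd : d1 = d2 := by
    funext a b
    exact Subsingleton.elim _ _
  rw [hd]

theorem min?_id_congr (l1 l2 : List (List Int)) (h1 : l1 ≠ []) (h2 : l2 ≠ [])
    (hmem : ∀ x, x ∈ l1 ↔ x ∈ l2) :
    PySem.List.min? l1 (fun x : List Int => x) = PySem.List.min? l2 (fun x : List Int => x) := by
  have hne1 : PySem.List.min? l1 (fun x : List Int => x) ≠ none :=
    fun h => h1 ((PySem.List.min?_eq_none_iff l1 (fun x : List Int => x)).mp h)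
  have hne2 : PySem.List.min? l2 (fun x : List Int => x) ≠ none :=
    fun h => h2 ((PySem.List.min?_eq_none_iff l2 (fun x : List Int => x)).mp h)
  obtain ⟨m1, hm1⟩ := Option.ne_none_iff_exists'.mp hne1
  obtain ⟨m2, hm2⟩ := Option.ne_none_iff_exists'.mp hne2
  have hm1' : @PySem.List.min? (List Int) (List Int) ((inferInstance : LinearOrder (List Int)).toLT)
      (@LinearOrder.toDecidableLT (List Int) inferInstance) l1 (fun x => x) = some m1 :=
    (min?_instEq _ _ listIntLT_eq l1 (fun x => x)).symm.trans hm1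
  have hm2' : @PySem.List.min? (List Int) (List Int) ((inferInstance : LinearOrder (List Int)).toLT)
      (@LinearOrder.toDecidableLT (List Int) inferInstance) l2 (fun x => x) = some m2 :=
    (min?_instEq _ _ listIntLT_eq l2 (fun x => x)).symm.trans hm2
  rw [hm1, hm2]
  have hmem1 := PySem.List.min?_mem hm1
  have hmem2 := PySem.List.min?_mem hm2
  have hle1 := PySem.List.min?_isMin hm1' m2 ((hmem _).mpr hmem2)
  have hle2 := PySem.List.min?_isMin hm2' m1 ((hmem _).mp hmem1)
  exact congrArg some (le_antisymm hle1 hle2)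

theorem canonB_exists_rot (c : List Int) : ∃ s, canonB c = c.rotate s := by
  by_cases hc : c = []
  · exact ⟨0, by simp [canonB, hc]⟩
  · have hne : PySem.List.min? (rotsB c) (fun x : List Int => x) ≠ none :=
      fun h => rotsB_ne_nil c hc ((PySem.List.min?_eq_none_iff (rotsB c) (fun x : List Int => x)).mp h)
    obtain ⟨m, hm⟩ := Option.ne_none_iff_exists'.mp hne
    have := (mem_rotsB c m).mp (PySem.List.min?_mem hm)
    obtain ⟨s, _, hr⟩ := this
    exact ⟨s, by rw [canonB, if_neg hc, hm]; simpa using hr⟩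

theorem length_canonB (c : List Int) : (canonB c).length = c.length := by
  obtain ⟨s, hs⟩ := canonB_exists_rot c
  rw [hs, List.length_rotate]

theorem canonB_rotate (c : List Int) (s : Nat) : canonB (c.rotate s) = canonB c := by
  by_cases hc : c = []
  · subst hc; simp [List.rotate_nil]
  · have hcr : c.rotate s ≠ [] := by
      intro h
      exact hc (by simpa using congrArg List.length h)
    rw [canonB, canonB, if_neg hc, if_neg hcr]
    congr 1
    apply min?_id_congr _ _ (rotsB_ne_nil _ hcr) (rotsB_ne_nil _ hc)
    intro x
    rw [mem_rotsB_iff _ hcr, mem_rotsB_iff _ hc]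
    constructor
    · rintro ⟨t, ht⟩
      exact ⟨s + t, by rw [ht, List.rotate_rotate]⟩
    · rintro ⟨u, hu⟩
      refine ⟨u + c.length * (s + 1) - s, ?_⟩
      rw [hu, List.rotate_rotate]
      have hsle : s ≤ c.length * (s + 1) := by nlinarith [List.length_pos_of_ne_nil hc]
      have heq : s + (u + c.length * (s + 1) - s) = u + c.length * (s + 1) := by omega
      have hm := List.rotate_length_mul (c.rotate u) (s + 1)
      rw [List.length_rotate] at hm
      rw [heq, ← List.rotate_rotate, hm]

theorem canonB_eq_iff (a b : List Int) : canonB a = canonB b ↔ ∃ s, b = a.rotate s := by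
  constructor
  · intro h
    obtain ⟨s1, h1⟩ := canonB_exists_rot a
    obtain ⟨s2, h2⟩ := canonB_exists_rot b
    by_cases hb : b = []
    · subst hb
      have : a.length = 0 := by
        have := length_canonB a
        rw [h] at this
        simpa [length_canonB] using this.symm
      exact ⟨0, by simp [List.eq_nil_of_length_eq_zero this]⟩
    · have hba : b.rotate s2 = a.rotate s1 := by rw [← h1, ← h2, h]
      have hpos : 0 < b.length := List.length_pos_of_ne_nil hb
      refine ⟨s1 + (b.length * (s2 + 1) - s2), ?_⟩
      rw [← List.rotate_rotate, ← hba, List.rotate_rotate]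
      have hsle : s2 ≤ b.length * (s2 + 1) := by nlinarith
      have : s2 + (b.length * (s2 + 1) - s2) = b.length * (s2 + 1) := by omega
      rw [this, List.rotate_length_mul]
  · rintro ⟨s, rfl⟩
    exact (canonB_rotate a s).symm

-- the pair lemma: on a good pair, A's Compare coincides with canonical-rotation equality
theorem compareA_eq_canon (k c : List Int) (h : GoodPairRE k c) :
    CompareA k c = decide (canonB k = canonB c) := by
  rw [GoodPairRE, not_or] at h
  obtain ⟨hne, hnp⟩ := h
  by_cases hk : k = []
  · have hc : c ≠ [] := fun hc => hne ⟨hk, hc⟩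
    have h1 : CompareA k c = false := by
      rw [Bool.eq_false_iff]
      intro hcmp
      obtain ⟨_, s, hs, _⟩ := (compareA_iff k c).mp hcmp
      subst hk
      simp at hs
    have h2 : canonB k ≠ canonB c := by
      intro heq
      have := length_canonB k ▸ length_canonB c ▸ congrArg List.length heq
      subst hk
      exact hc (List.eq_nil_of_length_eq_zero (by simpa using this.symm))
    simp [h1, h2]
  · rcases lt_trichotomy k.length c.length with hlt | heq | hgt
    · have h1 : CompareA k c = false := by
        rw [Bool.eq_false_iff]
        intro hcmp
        obtain ⟨_, s, hs, hr⟩ := (compareA_iff k c).mp hcmp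
        exact hnp ⟨hk, hlt, s, hs, hr⟩
      have h2 : canonB k ≠ canonB c := by
        intro heq
        have := length_canonB k ▸ length_canonB c ▸ congrArg List.length heq
        omega
      simp [h1, h2]
    · rw [Bool.eq_iff_iff, compareA_iff, MatchRel, decide_eq_true_iff, canonB_eq_iff]
      constructor
      · rintro ⟨_, s, _, hr⟩
        exact ⟨s, by rw [hr, heq, List.take_length]⟩
      · rintro ⟨s, rfl⟩
        have hpos : 0 < k.length := List.length_pos_of_ne_nil hk
        refine ⟨by omega, s % k.length, Nat.mod_lt _ hpos, ?_⟩
        rw [List.rotate_mod, heq, List.take_length]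
    · have h1 : CompareA k c = false := by
        rw [Bool.eq_false_iff]
        intro hcmp
        obtain ⟨hle, _⟩ := (compareA_iff k c).mp hcmp
        omega
      have h2 : canonB k ≠ canonB c := by
        intro heq
        have := length_canonB k ▸ length_canonB c ▸ congrArg List.length heq
        omega
      simp [h1, h2]

-- under pairwise-goodness A's greedy equals the canonical-rotation greedy
theorem greedyA_eq_greedyC (l : List (List Int)) (h : l.Pairwise GoodPairRE) :
    greedyA l = greedyC l := by
  induction hn : l.length using Nat.strong_induction_on generalizing l with
  | _ n ih =>
    match l with
    | [] => simp [greedyA, greedyC]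
    | c :: t =>
      rw [List.pairwise_cons] at h
      obtain ⟨hhead, htail⟩ := h
      have hfilter : t.filter (fun y => !CompareA c y)
          = t.filter (fun y => !decide (canonB c = canonB y)) := by
        apply List.filter_congr
        intro y hy
        rw [compareA_eq_canon c y (hhead y hy)]
      rw [greedyA_cons, greedyC_cons, hfilter]
      congr 1
      refine ih (t.filter (fun y => !decide (canonB c = canonB y))).length ?_ _
        (htail.sublist List.filter_sublist) rfl
      have := List.length_filter_le (fun y => !decide (canonB c = canonB y)) t
      simp only [List.length_cons] at hn
      omega

theorem foldG_eq (t : List (List Int)) : ∀ kept, foldG kept t =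
    kept ++ greedyC (t.filter (fun y => !kept.any (fun k => decide (canonB k = canonB y)))) := by
  induction t with
  | nil => intro kept; simp [foldG, greedyC]
  | cons c t ih =>
    intro kept
    rw [foldG]
    by_cases h : kept.any (fun k => decide (canonB k = canonB c)) = true
    · rw [if_pos h, ih kept, List.filter_cons]
      simp [h]
    · rw [if_neg h, ih (kept ++ [c]), List.filter_cons]
      have hpc : (!(kept.any fun k => decide (canonB k = canonB c))) = true := by simpa using h
      rw [if_pos hpc, greedyC_cons, List.filter_filter]
      conv_rhs => rw [List.append_cons]
      congr 2
      apply List.filter_congr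
      intro y _
      simp [List.any_append, Bool.not_or, Bool.and_comm]

theorem greedyC_eq_foldG (t : List (List Int)) : greedyC t = foldG [] t := by
  rw [foldG_eq]
  simp

theorem foldB_eq_foldG (rest : List (List Int)) : ∀ kept seen,
    InvB kept seen → (rest.foldl stepB (kept, seen)).1 = foldG kept rest := by
  induction rest with
  | nil => intro kept seen _; rfl
  | cons c t ih =>
    intro kept seen h
    rw [List.foldl_cons, foldG]
    have htest : PySem.Set.contains seen (canonB c)
        = kept.any (fun k => decide (canonB k = canonB c)) := by
      rw [Bool.eq_iff_iff, PySem.Set.contains_iff, h (canonB c), List.any_eq_true]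
      constructor
      · rintro ⟨k, hk, hkc⟩; exact ⟨k, hk, by simp [hkc]⟩
      · rintro ⟨k, hk, hkc⟩; exact ⟨k, hk, (by simpa using hkc : canonB k = canonB c).symm⟩
    by_cases hk : kept.any (fun k => decide (canonB k = canonB c)) = true
    · have hs : stepB (kept, seen) c = (kept, seen) := by
        simp only [stepB]
        rw [htest, if_pos hk]
      rw [hs, if_pos hk]
      exact ih kept seen h
    · have hs : stepB (kept, seen) c = (kept ++ [c], PySem.Set.add seen (canonB c)) := by
        simp only [stepB]
        rw [htest, if_neg hk]
      rw [hs, if_neg hk]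
      apply ih
      intro r
      rw [PySem.Set.mem_add, h r]
      simp only [List.mem_append, List.mem_singleton]
      constructor
      · rintro (⟨k, hk', hr⟩ | rfl)
        · exact ⟨k, Or.inl hk', hr⟩
        · exact ⟨c, Or.inr rfl, rfl⟩
      · rintro ⟨k, hk' | rfl, hr⟩
        · exact Or.inl ⟨k, hk', hr⟩
        · exact Or.inr hr

theorem main_eq (comb : List (List Int)) (h : comb.Pairwise GoodPairRE) :
    RemoveEqual comb = RemoveEqual_alt comb := by
  rw [removeEqual_eq_greedyA, greedyA_eq_greedyC comb h, greedyC_eq_foldG, RemoveEqual_alt]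
  exact (foldB_eq_foldG comb [] PySem.Set.empty (by intro r; simp [PySem.Set.empty])).symm

-- evaluation of port A at the difference witness (outerA is well-founded recursion, so we
-- evaluate through the greedyA characterisation)
theorem removeEqualA_witness : RemoveEqual [[], []] = [[], []] := by
  rw [removeEqual_eq_greedyA, greedyA_cons,
    show ([[]] : List (List Int)).filter (fun y => !CompareA [] y) = [[]] from rfl,
    greedyA_cons]
  simp [greedyA]

-- ===== VERDICT (by name: the statement is the Claim_ definition above) =====
theorem RemoveEqual_spec : Claim_unchanged_RemoveEqual := by
  intro comb _ _
  unfold Spec_RemoveEqual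
  intro hnd
  exact main_eq comb (not_not.mp hnd)

theorem RemoveEqual_changed : Claim_changed_RemoveEqual := by
  unfold Claim_changed_RemoveEqual
  refine ⟨by decide, by decide, by decide, removeEqualA_witness, by decide, by decide⟩
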